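-- pv_equiv track=rewrite | github.com/osabv/PuzzleSolver | grid_peg_solitaire_puzzle.py | make_bottom_board
-- ===== SOURCE A (Python) =====
-- def make_bottom_board(board, x, y):
--     """
--     Return a new marker for an extension of GridPegSolitairePuzzle
--
--     @type board: list[list[str]]
--     @type x: int
--     @type y: int
--     @rtype: list[list[str]]
--     """
--     copy = []
--     for row_num in range(len(board)):
--         if row_num == x:
--             copy_row = []
--             for col_num in range(len(board[row_num])):
--                 if col_num == y:
--                     copy_row.append('*')
--                 else:
--                     copy_row.append(board[row_num][col_num])
--             copy.append(copy_row)
--         elif row_num == x+1: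
--             copy_row = []
--             for col_num in range(len(board[row_num])):
--                 if col_num == y:
--                     copy_row.append('.')
--                 else:
--                     copy_row.append(board[row_num][col_num])
--             copy.append(copy_row)
--         elif row_num == x+2:
--             copy_row = []
--             for col_num in range(len(board[row_num])):
--                 if col_num == y:
--                     copy_row.append('.')
--                 else:
--                     copy_row.append(board[row_num][col_num])
--             copy.append(copy_row)
--         else:
--             copy_row = []
--             for col_num in range(len(board[row_num])):
--                 copy_row.append(board[row_num][col_num])
--             copy.append(copy_row)
--     return copy
-- ===== SOURCE B (Python) =====
-- def make_bottom_board(board, x, y):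
--     """
--     Return a new marker for an extension of GridPegSolitairePuzzle
--
--     @type board: list[list[str]]
--     @type x: int
--     @type y: int
--     @rtype: list[list[str]]
--     """
--     copy = [list(row) for row in board]
--     for r, ch in ((x, '*'), (x + 1, '.'), (x + 2, '.')):
--         if 0 <= r < len(copy) and 0 <= y < len(copy[r]):
--             copy[r][y] = ch
--     return copy
-- ===== Notes on version B (the rewrite author's own statement) =====
-- stated objective: simpler
-- what changed: B replaces A's four near-identical per-row copy loops with one uniform whole-board copy followed by three bounds-guarded point writes.
import Mathlib
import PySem

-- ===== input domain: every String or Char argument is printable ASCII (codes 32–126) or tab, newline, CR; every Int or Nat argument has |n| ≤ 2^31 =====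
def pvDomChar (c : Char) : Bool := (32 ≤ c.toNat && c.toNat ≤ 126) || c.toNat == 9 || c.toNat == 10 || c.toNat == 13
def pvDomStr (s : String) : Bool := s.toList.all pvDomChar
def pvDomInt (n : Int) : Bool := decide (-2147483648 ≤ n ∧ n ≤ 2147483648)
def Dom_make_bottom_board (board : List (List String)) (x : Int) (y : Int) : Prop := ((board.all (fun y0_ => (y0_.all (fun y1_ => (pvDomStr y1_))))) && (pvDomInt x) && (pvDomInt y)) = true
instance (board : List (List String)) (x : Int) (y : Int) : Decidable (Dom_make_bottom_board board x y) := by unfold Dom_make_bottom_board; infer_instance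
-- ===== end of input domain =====

-- B replaces A's four near-identical per-row copy loops with one uniform whole-board
-- copy followed by three bounds-guarded point writes (objective: simpler).

-- ===== PORT A =====
-- A: one pass over row indices; on rows x / x+1 / x+2 the row is rebuilt cell by cell
-- with column y replaced; other rows are copied cell by cell.
def make_bottom_board (board : List (List String)) (x : Int) (y : Int) : List (List String) :=
  (List.range board.length).map (fun (row_num : Nat) =>
    let row := board.getD row_num []
    if (row_num : Int) = x then
      (List.range row.length).map (fun (col_num : Nat) =>
        if (col_num : Int) = y then "*" else row.getD col_num "")
    else if (row_num : Int) = x + 1 then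
      (List.range row.length).map (fun (col_num : Nat) =>
        if (col_num : Int) = y then "." else row.getD col_num "")
    else if (row_num : Int) = x + 2 then
      (List.range row.length).map (fun (col_num : Nat) =>
        if (col_num : Int) = y then "." else row.getD col_num "")
    else
      (List.range row.length).map (fun (col_num : Nat) => row.getD col_num ""))

-- ===== PORT B =====
-- guarded point write: copy[r][y] := ch when 0 <= r < len(copy) and 0 <= y < len(copy[r])
def pvSetAt (rows : List (List String)) (r : Int) (y : Int) (ch : String) : List (List String) :=
  if 0 ≤ r ∧ r < (rows.length : Int) ∧ 0 ≤ y ∧ y < ((rows.getD r.toNat []).length : Int) then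
    rows.set r.toNat ((rows.getD r.toNat []).set y.toNat ch)
  else rows

def make_bottom_board_alt (board : List (List String)) (x : Int) (y : Int) : List (List String) :=
  let copy := board.map (fun row => row.map id)
  [(x, "*"), (x + 1, "."), (x + 2, ".")].foldl
    (fun c (p : Int × String) => pvSetAt c p.1 y p.2) copy

-- ===== PRECONDITION & SPEC =====
def Spec_make_bottom_board (board : List (List String)) (x : Int) (y : Int) (out : List (List String)) : Prop := out = make_bottom_board_alt board x y
instance (board : List (List String)) (x : Int) (y : Int) (out : List (List String)) : Decidable (Spec_make_bottom_board board x y out) := by unfold Spec_make_bottom_board; infer_instance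

-- ===== CLAIM (what is proved, stated in full; the proofs are below) =====
def Claim_equal_make_bottom_board : Prop := ∀ (board : List (List String)) (x : Int) (y : Int), Dom_make_bottom_board board x y → Spec_make_bottom_board board x y (make_bottom_board board x y)

-- ===== LEMMAS AND PROOFS =====

-- rebuilding a row cell by cell is the row itself
theorem map_range_getD (row : List String) :
    (List.range row.length).map (fun (col_num : Nat) => row.getD col_num "") = row := by
  apply List.ext_getElem
  · simp
  · intro i h1 h2
    simp [List.getElem?_eq_getElem h2]

-- the cell-by-cell rebuild with column y replaced is a (possibly out-of-range) List.set
theorem map_range_set (row : List String) (y : Int) (ch : String) :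
    (List.range row.length).map (fun (col_num : Nat) =>
        if (col_num : Int) = y then ch else row.getD col_num "") =
      (if 0 ≤ y then row.set y.toNat ch else row) := by
  apply List.ext_getElem
  · by_cases h : 0 ≤ y <;> simp [h]
  · intro i h1 h2
    simp only [List.getElem_map, List.getElem_range]
    by_cases hy : (i : Int) = y
    · have h0 : 0 ≤ y := hy ▸ Int.natCast_nonneg i
      have hti : y.toNat = i := by omega
      have hiL : i < row.length := by simpa using h1
      simp [hy, h0, hti]
    · by_cases h0 : 0 ≤ y
      · have hti : y.toNat ≠ i := by omega
        have hiL : i < row.length := by simpa using h1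
        simp [hy, h0, hti, List.getElem?_eq_getElem hiL]
      · have hiL : i < row.length := by simpa using h1
        simp [hy, h0, List.getElem?_eq_getElem hiL]

theorem pvSetAt_length (rows : List (List String)) (r y : Int) (ch : String) :
    (pvSetAt rows r y ch).length = rows.length := by
  unfold pvSetAt; split <;> simp

theorem pvSetAt_getElem (rows : List (List String)) (r y : Int) (ch : String)
    (i : Nat) (hi : i < rows.length) (hi' : i < (pvSetAt rows r y ch).length) :
    (pvSetAt rows r y ch)[i] =
      if (i : Int) = r ∧ 0 ≤ y ∧ y.toNat < rows[i].length then rows[i].set y.toNat ch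
      else rows[i] := by
  unfold pvSetAt at *
  by_cases hc : 0 ≤ r ∧ r < (rows.length : Int) ∧ 0 ≤ y ∧ y < ((rows.getD r.toNat []).length : Int)
  · obtain ⟨hr0, hrlt, hy0, hylt⟩ := hc
    have hrt : r.toNat < rows.length := by omega
    simp only [if_pos (⟨hr0, hrlt, hy0, hylt⟩ :
      0 ≤ r ∧ r < (rows.length : Int) ∧ 0 ≤ y ∧ y < ((rows.getD r.toNat []).length : Int))]
    by_cases hir : (i : Int) = r
    · have hri : r.toNat = i := by omega
      have hgd : rows.getD r.toNat [] = rows[i] := by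
        rw [List.getD_eq_getElem _ _ hrt]
        congr 1
      have hyl : y.toNat < rows[i].length := by
        rw [hgd] at hylt; omega
      simp [hri, hir, hy0, hyl, List.getElem?_eq_getElem hi]
    · have hri : r.toNat ≠ i := by omega
      simp [hri, hir]
  · simp only [if_neg hc]
    by_cases hir : (i : Int) = r
    · have hr0 : 0 ≤ r := hir ▸ Int.natCast_nonneg i
      have hrlt : r < (rows.length : Int) := by omega
      have hrt : r.toNat < rows.length := by omega
      have hri : r.toNat = i := by omega
      have hgd : rows.getD r.toNat [] = rows[i] := by
        rw [List.getD_eq_getElem _ _ hrt]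
        congr 1
      have hno : ¬ (0 ≤ y ∧ y.toNat < rows[i].length) := by
        intro ⟨hy0, hyl⟩
        exact hc ⟨hr0, hrlt, hy0, by rw [hgd]; omega⟩
      exact (if_neg (fun h => hno ⟨h.2.1, h.2.2⟩)).symm
    · exact (if_neg (fun h => hir h.1)).symm

theorem pvCopy_id (board : List (List String)) :
    board.map (fun row => row.map id) = board := by
  simp

theorem make_bottom_board_spec : Claim_equal_make_bottom_board := by
  intro board x y _
  show make_bottom_board board x y = make_bottom_board_alt board x y
  unfold make_bottom_board make_bottom_board_alt
  rw [pvCopy_id]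
  simp only [List.foldl]
  apply List.ext_getElem
  · simp [pvSetAt_length]
  · intro i h1 h2
    have hib : i < board.length := by simpa [pvSetAt_length] using h2
    have hb1 : i < (pvSetAt board x y "*").length := by simpa [pvSetAt_length]
    have hb2 : i < (pvSetAt (pvSetAt board x y "*") (x + 1) y ".").length := by
      simpa [pvSetAt_length]
    rw [pvSetAt_getElem _ _ _ _ i hb2 h2, pvSetAt_getElem _ _ _ _ i hb1 hb2,
      pvSetAt_getElem _ _ _ _ i hib hb1]
    simp only [List.getElem_map, List.getElem_range]
    have hgd : board.getD i [] = board[i] := List.getD_eq_getElem _ _ hib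
    rw [hgd]
    by_cases hx : (i : Int) = x
    · rw [if_pos hx, map_range_set]
      by_cases hy0 : 0 ≤ y
      · by_cases hyl : y.toNat < board[i].length
        · simp [hx, hy0, hyl]
        · have hle : board[i].length ≤ y.toNat := by omega
          simp [hx, hy0, hyl, List.set_eq_of_length_le hle]
      · simp [hx, hy0]
    · by_cases hx1 : (i : Int) = x + 1
      · rw [if_neg hx, if_pos hx1, map_range_set]
        by_cases hy0 : 0 ≤ y
        · by_cases hyl : y.toNat < board[i].length
          · simp [hx1, hy0, hyl]
          · have hle : board[i].length ≤ y.toNat := by omega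
            simp [hx1, hy0, hyl, List.set_eq_of_length_le hle]
        · simp [hx1, hy0]
      · by_cases hx2 : (i : Int) = x + 2
        · rw [if_neg hx, if_neg hx1, if_pos hx2, map_range_set]
          by_cases hy0 : 0 ≤ y
          · by_cases hyl : y.toNat < board[i].length
            · simp [hx2, hy0, hyl]
            · have hle : board[i].length ≤ y.toNat := by omega
              simp [hx2, hy0, hyl, List.set_eq_of_length_le hle]
          · simp [hx2, hy0]
        · rw [if_neg hx, if_neg hx1, if_neg hx2, map_range_getD]
          simp [hx, hx1, hx2]
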